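-- pv_equiv track=rewrite | github.com/gopinathsundaramurthy/GSE-Reader-Dev-version | bin/extract_info.py | parse_data_attr
-- ===== SOURCE A (Python) =====
-- def parse_data_attr(data_list, needed_attr):
--     # Parses data blocks for Platform and Sample information
--     # and converts them into lists.
--     out_data_list = []
--     data_attr_names = data_list[0].split('\t')
--     needed_list = [data_attr in needed_attr
--                    for data_attr in data_attr_names]
--     for data_line in data_list:
--         part_values = data_line.split('\t')
--         if len(part_values)!= len(needed_list):
--             # Ill-formed data line, skip
--             continue
--         selected_attrs = []
--         for val, needed in zip(part_values, needed_list):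
--             if needed:
--                 # Retains user selected attributes
--                 selected_attrs.append(val)
--         out_data_list.append(selected_attrs)
--     return out_data_list
-- ===== SOURCE B (Python) =====
-- def parse_data_attr(data_list, needed_attr):
--     # Columnar strategy: split everything, keep well-formed rows, build the
--     # selected COLUMNS, then transpose back into rows.
--     rows = [line.split('\t') for line in data_list]
--     ncols = len(rows[0])
--     kept = [r for r in rows if len(r) == ncols]
--     header = rows[0]
--     cols = [[r[j] for r in kept]
--             for j in range(ncols) if header[j] in needed_attr]
--     if not cols:
--         return [[] for _ in kept]
--     return [list(t) for t in zip(*cols)]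
-- ===== Notes on version B (the rewrite author's own statement) =====
-- stated objective: alternative
-- what changed: B works column-major: it splits all lines, filters well-formed rows, materialises each needed COLUMN as a list, and transposes the columns back into rows with zip(*cols), instead of A's row-major pass that filters each row through a per-column boolean mask.
import Mathlib
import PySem

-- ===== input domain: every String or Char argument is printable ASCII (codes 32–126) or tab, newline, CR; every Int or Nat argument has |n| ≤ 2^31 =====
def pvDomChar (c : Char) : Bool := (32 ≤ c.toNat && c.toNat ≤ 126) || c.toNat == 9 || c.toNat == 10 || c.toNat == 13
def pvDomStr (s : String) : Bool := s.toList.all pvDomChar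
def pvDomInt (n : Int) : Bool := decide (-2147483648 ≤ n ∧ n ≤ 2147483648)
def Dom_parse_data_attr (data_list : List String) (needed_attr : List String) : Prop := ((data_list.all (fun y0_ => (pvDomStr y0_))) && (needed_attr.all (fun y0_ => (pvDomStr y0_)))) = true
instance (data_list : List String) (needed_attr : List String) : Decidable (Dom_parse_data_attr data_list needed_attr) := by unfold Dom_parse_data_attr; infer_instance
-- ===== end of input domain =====

-- B is column-major: it materialises the selected columns and transposes them back
-- into rows, instead of A's row-major boolean-mask filtering pass (alternative).

-- shared helper: s.split('\t')  (sep is the nonempty literal "\t", so split? is some)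
def pvSplitTab (s : String) : List String := (PySem.Str.split? s "\t").getD []

-- ===== PORT A =====
def parse_data_attr (data_list : List String) (needed_attr : List String) : List (List String) :=
  let data_attr_names := pvSplitTab (data_list.headD "")
  let needed_list := data_attr_names.map (fun a => needed_attr.contains a)
  data_list.foldl (fun out_data_list data_line =>
    let part_values := pvSplitTab data_line
    if part_values.length ≠ needed_list.length then out_data_list
    else
      let selected_attrs := (part_values.zip needed_list).foldl
        (fun sel vb => if vb.2 then sel ++ [vb.1] else sel) []
      out_data_list ++ [selected_attrs]) []

-- ===== PORT B =====
-- zip(*cols) for a NONEMPTY list of columns: take a head from every column while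
-- all are nonempty (Python's zip stops at the shortest iterable).
def pvZipStar : List (List String) → List (List String)
  | [] => []
  | c :: cs =>
      if h : (c :: cs).all (fun col => !col.isEmpty) then
        ((c :: cs).map (fun col => col.headD "")) :: pvZipStar ((c :: cs).map List.tail)
      else []
  termination_by cols => (cols.headD []).length
  decreasing_by
    simp only [List.all_cons, Bool.and_eq_true, Bool.not_eq_true'] at h
    cases c with
    | nil => simp [List.isEmpty] at h
    | cons x xs => simp

def parse_data_attr_alt (data_list : List String) (needed_attr : List String) : List (List String) :=
  let rows := data_list.map pvSplitTab
  let ncols := (rows.headD []).length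
  let kept := rows.filter (fun r => r.length == ncols)
  let header := rows.headD []
  let cols := (List.range ncols).filterMap (fun (j : Nat) =>
    -- header[j] / r[j]: j < ncols so pyGetD is exact here
    if needed_attr.contains (PySem.List.pyGetD header (j : Int) "") then
      some (kept.map (fun r => PySem.List.pyGetD r (j : Int) ""))
    else none)
  if cols.isEmpty then kept.map (fun _ => [])
  else pvZipStar cols

-- ===== PRECONDITION & SPEC =====
-- Both Pythons index data_list[0]: the empty data_list raises IndexError, excluded.
def Pre_parse_data_attr (data_list : List String) (needed_attr : List String) : Prop :=
  data_list ≠ []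
instance (data_list : List String) (needed_attr : List String) : Decidable (Pre_parse_data_attr data_list needed_attr) := by unfold Pre_parse_data_attr; infer_instance

def pvWitness_parse_data_attr : List String × List String :=
  (["id\tname\tage", "1\tbob\t7", "2\tsue\t8"], ["name", "age"])

def Spec_parse_data_attr (data_list : List String) (needed_attr : List String) (out : List (List String)) : Prop := out = parse_data_attr_alt data_list needed_attr
instance (data_list : List String) (needed_attr : List String) (out : List (List String)) : Decidable (Spec_parse_data_attr data_list needed_attr out) := by unfold Spec_parse_data_attr; infer_instance

-- ===== CLAIM (what is proved, stated in full; the proofs are below) =====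
def Claim_equal_parse_data_attr : Prop := ∀ (data_list : List String) (needed_attr : List String), Dom_parse_data_attr data_list needed_attr → Pre_parse_data_attr data_list needed_attr → Spec_parse_data_attr data_list needed_attr (parse_data_attr data_list needed_attr)

-- ===== LEMMAS AND PROOFS =====

-- transpose: zipping a nonempty list of columns, each column j being the j-gather of
-- the rows of `kept`, yields the per-row gathers.
theorem pvZipStar_gather (g : Nat → List String → String) :
    ∀ (kept : List (List String)) (idx : List Nat), idx ≠ [] →
      pvZipStar (idx.map (fun j => kept.map (g j)))
        = kept.map (fun r => idx.map (fun j => g j r)) := by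
  intro kept
  induction kept with
  | nil =>
    intro idx h
    cases idx with
    | nil => exact absurd rfl h
    | cons j js => simp [pvZipStar]
  | cons r ks ih =>
    intro idx h
    cases idx with
    | nil => exact absurd rfl h
    | cons j js =>
      rw [show ((j :: js).map (fun j => (r :: ks).map (g j)))
            = (g j r :: ks.map (g j)) :: js.map (fun j => g j r :: ks.map (g j)) by
          simp]
      rw [pvZipStar]
      have hall : ((g j r :: ks.map (g j)) :: js.map (fun j => g j r :: ks.map (g j))).all
          (fun col => !col.isEmpty) = true := by
        simp only [List.all_eq_true]
        intro c hc
        simp only [List.mem_cons, List.mem_map] at hc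
        rcases hc with hc | ⟨j', _, hj'⟩
        · simp [hc]
        · simp [← hj']
      rw [dif_pos hall]
      have hheads : (((g j r :: ks.map (g j)) :: js.map (fun j => g j r :: ks.map (g j))).map
          (fun col => col.headD "")) = (j :: js).map (fun j => g j r) := by
        simp [List.map_map, Function.comp]
      have htails : (((g j r :: ks.map (g j)) :: js.map (fun j => g j r :: ks.map (g j))).map
          List.tail) = (j :: js).map (fun j => ks.map (g j)) := by
        simp [List.map_map, Function.comp]
      rw [hheads, htails, ih (j :: js) (by simp)]
      simp

-- A's boolean-mask filter of a row equals the index gather over range: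
-- H is the header, `full` the row, both read from absolute index k on.
theorem pv_select_eq (f : String → Bool) :
    ∀ (hs part : List String) (k : Nat) (H full : List String),
      H.drop k = hs → full.drop k = part → part.length = hs.length →
      ∀ (acc : List String),
      (part.zip (hs.map f)).foldl (fun sel vb => if vb.2 then sel ++ [vb.1] else sel) acc
        = acc ++ (List.range' k hs.length).filterMap
            (fun (j : Nat) => if f (PySem.List.pyGetD H (j : Int) "") then
                        some (PySem.List.pyGetD full (j : Int) "") else none) := by
  intro hs
  induction hs with
  | nil =>
    intro part k H full hH hfull hlen acc
    have : part = [] := List.eq_nil_of_length_eq_zero hlen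
    subst this
    simp
  | cons h hs ih =>
    intro part k H full hH hfull hlen acc
    match part with
    | [] => simp at hlen
    | v :: rest =>
      have hHget : H[k]? = some h := by
        have : (H.drop k)[0]? = some h := by rw [hH]; rfl
        simpa using this
      have hget : full[k]? = some v := by
        have : (full.drop k)[0]? = some v := by rw [hfull]; rfl
        simpa using this
      have hHrest : H.drop (k + 1) = hs := by
        have : (H.drop k).drop 1 = H.drop (k + 1) := by rw [List.drop_drop]
        rw [← this, hH]; rfl
      have hrest : full.drop (k + 1) = rest := by
        have : (full.drop k).drop 1 = full.drop (k + 1) := by rw [List.drop_drop]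
        rw [← this, hfull]; rfl
      have hlen' : rest.length = hs.length := by simpa using hlen
      have hH' : PySem.List.pyGetD H (k : Int) "" = h := by
        rw [PySem.List.pyGetD_natCast]; simp [List.getD, hHget]
      have hv : PySem.List.pyGetD full (k : Int) "" = v := by
        rw [PySem.List.pyGetD_natCast]; simp [List.getD, hget]
      rw [show List.range' k (h :: hs).length = k :: List.range' (k+1) hs.length by
        simp [List.range']]
      simp only [List.zip_cons_cons, List.map_cons, List.foldl_cons, List.filterMap_cons,
        hH', hv]
      by_cases hf : f h
      · simp only [hf, if_true]
        rw [ih rest (k + 1) H full hHrest hrest hlen' (acc ++ [v])]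
        simp
      · simp only [hf, if_false, Bool.false_eq_true]
        rw [ih rest (k + 1) H full hHrest hrest hlen' acc]

theorem parse_data_attr_spec : Claim_equal_parse_data_attr := by
  intro data_list needed_attr _ hpre
  unfold Spec_parse_data_attr parse_data_attr parse_data_attr_alt
  dsimp only
  set H := pvSplitTab (data_list.headD "") with hHdef
  have hrowshead : (data_list.map pvSplitTab).headD [] = H := by
    cases data_list with
    | nil => exact absurd rfl hpre
    | cons x xs => simp [hHdef]
  rw [hrowshead]
  set ncols := H.length with hncols
  set f : String → Bool := fun a => needed_attr.contains a with hf
  set idx : List Nat := (List.range ncols).filterMap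
    (fun (j : Nat) => if f (PySem.List.pyGetD H (j : Int) "") then some j else none) with hidx
  set p : String → Bool := fun line => (pvSplitTab line).length == ncols with hp
  set kept : List (List String) := (data_list.map pvSplitTab).filter
    (fun r => r.length == ncols) with hkept
  -- B's cols are idx.map of column gathers
  have hcols : (List.range ncols).filterMap (fun (j : Nat) =>
      if f (PySem.List.pyGetD H (j : Int) "") then
        some (kept.map (fun r => PySem.List.pyGetD r (j : Int) "")) else none)
      = idx.map (fun (j : Nat) => kept.map (fun r => PySem.List.pyGetD r (j : Int) "")) := by
    rw [hidx, List.map_filterMap]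
    congr 1
    funext j
    by_cases hc : f (PySem.List.pyGetD H (j : Int) "") <;> simp [hc]
  rw [hcols]
  -- B = kept.map gather, in both branches
  have hB : (if (idx.map (fun (j : Nat) => kept.map (fun r => PySem.List.pyGetD r (j : Int) ""))).isEmpty
        then kept.map (fun _ => ([] : List String))
        else pvZipStar (idx.map (fun (j : Nat) => kept.map (fun r => PySem.List.pyGetD r (j : Int) ""))))
      = kept.map (fun r => idx.map (fun (j : Nat) => PySem.List.pyGetD r (j : Int) "")) := by
    by_cases hi : idx = []
    · simp [hi]
    · rw [if_neg (by simp [List.isEmpty_iff, hi])]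
      exact pvZipStar_gather (fun j r => PySem.List.pyGetD r (j : Int) "") kept idx hi
  rw [hB]
  -- kept = the split of the lines passing the length test
  have hkept' : kept = (data_list.filter p).map pvSplitTab := by
    rw [hkept, List.filter_map]
    simp [hp, Function.comp_def]
  -- A's foldl = filter-then-map of the mask selection
  have hflip : data_list.foldl (fun out data_line =>
        if (pvSplitTab data_line).length ≠ (H.map f).length then out
        else out ++ [((pvSplitTab data_line).zip (H.map f)).foldl
          (fun sel vb => if vb.2 then sel ++ [vb.1] else sel) []]) []
      = data_list.foldl (fun out data_line =>
        if p data_line then out ++ [((pvSplitTab data_line).zip (H.map f)).foldl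
          (fun sel vb => if vb.2 then sel ++ [vb.1] else sel) []] else out) [] := by
    apply PySem.List.foldl_congr_mem
    intro acc line _
    by_cases hl : (pvSplitTab line).length = ncols
    · rw [if_neg (by simp only [List.length_map, ← hncols]; simp [hl]),
          if_pos (by simp [hp, hl])]
    · rw [if_pos (by simp only [List.length_map, ← hncols]; exact hl),
          if_neg (by simp [hp, hl])]
  rw [hflip, PySem.List.foldl_append_if]
  -- both sides are maps over (data_list.filter p); compare elementwise
  rw [hkept', List.map_map, List.nil_append]
  apply List.map_congr_left
  intro line hline
  have hlen : (pvSplitTab line).length = ncols := by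
    have := (List.mem_filter.mp hline).2
    simpa [hp] using this
  rw [pv_select_eq f H (pvSplitTab line) 0 H (pvSplitTab line) (by simp) (by simp)
      (by rw [hlen, hncols]) []]
  simp only [Function.comp_apply, List.nil_append]
  rw [List.map_filterMap, ← hncols, List.range_eq_range']
  congr 1
  funext j
  by_cases hc : f (PySem.List.pyGetD H (j : Int) "") <;> simp [hc]
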